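-- pv_equiv track=rewrite | github.com/lluc-palou/ap1-jutge | recursion/P22467.py | is_perfect_prime
-- ===== SOURCE A (Python) =====
-- def es_primer(n: int) -> bool:
--     """Indica si el nombre introduit és primer."""
--
--     if n <= 1:
--         return False
--     else:
--         d = 2
--         while d * d <= n:
--             if n % d == 0:
--                 return False
--             d = d + 1
--         return True
--
-- def suma_dels_digits(n: int) -> int:
--     """Retorna la suma dels dígits d'un nombre donat."""
--
--     if n < 10:
--         return n
--     else:
--         return n % 10 + suma_dels_digits(n // 10)
--
-- def is_perfect_prime(n: int) -> bool:
--     """Indica si el nombre introduit és un primer perfecte, és a dir,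
--     que la suma dels seus digits en tot moment és un nombre primer."""
--
--     if es_primer(n):
--         if n < 10 and es_primer(n):
--             return True
--         elif es_primer(suma_dels_digits(n)):
--             return is_perfect_prime(suma_dels_digits(n))
--         else:
--             return False
--     else:
--         return False
-- ===== SOURCE B (Python) =====
-- def _prime(n: int) -> bool:
--     """Trial division testing 2 then odd divisors only."""
--     if n < 2:
--         return False
--     if n % 2 == 0:
--         return n == 2
--     d = 3
--     while d * d <= n:
--         if n % d == 0:
--             return False
--         d += 2
--     return True
--
-- def _digit_sum(n: int) -> int:
--     s = 0
--     while n >= 10: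
--         s += n % 10
--         n //= 10
--     return s + n
--
-- def is_perfect_prime(n: int) -> bool:
--     """Build the chain of iterated digit sums, then check they are all prime."""
--     chain = []
--     m = n
--     while True:
--         chain.append(m)
--         if m < 10:
--             break
--         m = _digit_sum(m)
--     return all(_prime(x) for x in chain)
-- ===== Notes on version B (the rewrite author's own statement) =====
-- stated objective: alternative
-- what changed: B first materialises the chain of iterated digit sums as a list and then checks all(prime) over it (instead of A's tail recursion that re-tests at each level), uses an odd-step trial division that dispatches the even case separately, and an iterative accumulator digit sum instead of A's recursive one.
import Mathlib
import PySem

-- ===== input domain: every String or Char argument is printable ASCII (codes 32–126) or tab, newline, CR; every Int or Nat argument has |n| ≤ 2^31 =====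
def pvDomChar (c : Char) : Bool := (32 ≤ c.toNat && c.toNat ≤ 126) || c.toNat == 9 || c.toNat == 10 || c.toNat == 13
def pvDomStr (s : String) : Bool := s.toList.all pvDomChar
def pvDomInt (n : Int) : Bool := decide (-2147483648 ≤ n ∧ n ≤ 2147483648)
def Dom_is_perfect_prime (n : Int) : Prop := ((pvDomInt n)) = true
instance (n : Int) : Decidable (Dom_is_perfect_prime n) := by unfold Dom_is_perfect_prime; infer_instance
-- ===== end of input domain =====

-- B builds the list of iterated digit sums first and then checks that all its elements are
-- prime (with an odd-step trial division and an accumulator digit sum), instead of A's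
-- tail recursion that re-tests primality level by level; objective: alternative.

-- ===== PORT A =====

-- termination helper for the trial-division loops (cited in decreasing_by)
theorem pv_le_of_sq_le {d n : Int} (h : d * d ≤ n) : d ≤ n := by
  by_cases h1 : d ≤ 0
  · have := mul_self_nonneg d; omega
  · have : d * 1 ≤ d * d := mul_le_mul_of_nonneg_left (by omega) (by omega)
    omega

theorem pv_dec_sq {n d : Int} (h : d * d ≤ n) :
    (n + 1 - (d + 1)).toNat < (n + 1 - d).toNat := by
  have := pv_le_of_sq_le h; omega

-- the `while d * d <= n` loop of es_primer (step 1)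
def es_primer_loop (n d : Int) : Bool :=
  if h : d * d ≤ n then
    if PySem.Int.mod n d = 0 then false
    else es_primer_loop n (d + 1)
  else true
termination_by (n + 1 - d).toNat
decreasing_by exact pv_dec_sq h

def es_primer (n : Int) : Bool :=
  if n ≤ 1 then false else es_primer_loop n 2

-- termination helper: for n ≥ 10 the quotient n // 10 is nonnegative and smaller (cited in decreasing_by)
theorem pv_floordiv10 {n : Int} (h : ¬ n < 10) :
    0 ≤ PySem.Int.floordiv n 10 ∧ PySem.Int.floordiv n 10 < n := by
  rw [PySem.Int.floordiv_eq_ediv_of_pos (by omega)]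
  omega

theorem pv_dec_div {n : Int} (h : ¬ n < 10) :
    (PySem.Int.floordiv n 10).toNat < n.toNat := by
  have := pv_floordiv10 h; omega

def suma_dels_digits (n : Int) : Int :=
  if h : n < 10 then n
  else PySem.Int.mod n 10 + suma_dels_digits (PySem.Int.floordiv n 10)
termination_by n.toNat
decreasing_by exact pv_dec_div h

-- termination helpers for is_perfect_prime's recursion (cited in decreasing_by)
theorem pv_suma_le (n : Int) : suma_dels_digits n ≤ n := by
  rw [suma_dels_digits]
  split
  · exact le_refl n
  · rename_i h
    have hdm := PySem.Int.floordiv_mul_add_mod n 10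
    have hm1 := PySem.Int.mod_nonneg n (b := 10) (by omega)
    have hm2 := PySem.Int.mod_lt n (b := 10) (by omega)
    have hih := pv_suma_le (PySem.Int.floordiv n 10)
    omega
termination_by n.toNat
decreasing_by exact pv_dec_div (by omega)

theorem pv_suma_lt {n : Int} (h : ¬ n < 10) : suma_dels_digits n < n := by
  rw [suma_dels_digits]
  simp only [h, dif_neg, not_false_iff]
  have hdm := PySem.Int.floordiv_mul_add_mod n 10
  have hm1 := PySem.Int.mod_nonneg n (b := 10) (by omega)
  have hm2 := PySem.Int.mod_lt n (b := 10) (by omega)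
  have hih := pv_suma_le (PySem.Int.floordiv n 10)
  omega

theorem pv_dec_suma {n : Int} (h10 : ¬ n < 10) : (suma_dels_digits n).toNat < n.toNat := by
  have := pv_suma_lt h10; omega

def is_perfect_prime (n : Int) : Bool :=
  if hp : es_primer n = true then
    if decide (n < 10) && es_primer n then true
    else if es_primer (suma_dels_digits n) = true then
      is_perfect_prime (suma_dels_digits n)
    else false
  else false
termination_by n.toNat
decreasing_by
  rename_i hlt _
  exact pv_dec_suma (fun hn => hlt (by simp [hn, hp]))

-- ===== PORT B =====

-- B's trial-division loop testing odd candidates only (step 2)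
def prime_loop_b (n d : Int) : Bool :=
  if h : d * d ≤ n then
    if PySem.Int.mod n d = 0 then false
    else prime_loop_b n (d + 2)
  else true
termination_by (n + 1 - d).toNat
decreasing_by have := pv_le_of_sq_le h; omega

-- B's primality test: even case dispatched separately, then odd divisors from 3
def prime_b (n : Int) : Bool :=
  if n < 2 then false
  else if PySem.Int.mod n 2 = 0 then decide (n = 2)
  else prime_loop_b n 3

-- B's digit sum: accumulator loop  s = 0; while n >= 10: s += n % 10; n //= 10; return s + n
def digsum_loop (s n : Int) : Int :=
  if h : n ≥ 10 then digsum_loop (s + PySem.Int.mod n 10) (PySem.Int.floordiv n 10)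
  else s + n
termination_by n.toNat
decreasing_by exact pv_dec_div (by omega)

def digit_sum_b (n : Int) : Int := digsum_loop 0 n

-- termination helpers for the chain builder (cited in decreasing_by below)
theorem pv_digsum_le (s n : Int) : digsum_loop s n ≤ s + n := by
  rw [digsum_loop]
  split
  · rename_i h
    have hdm := PySem.Int.floordiv_mul_add_mod n 10
    have hm1 := PySem.Int.mod_nonneg n (b := 10) (by omega)
    have hm2 := PySem.Int.mod_lt n (b := 10) (by omega)
    have hih := pv_digsum_le (s + PySem.Int.mod n 10) (PySem.Int.floordiv n 10)
    omega
  · omega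
termination_by n.toNat
decreasing_by exact pv_dec_div (by omega)

theorem pv_dec_digit_sum {n : Int} (h10 : ¬ n < 10) : (digit_sum_b n).toNat < n.toNat := by
  have h1 : digsum_loop 0 n ≤ 0 + (PySem.Int.mod n 10) + (PySem.Int.floordiv n 10) := by
    rw [digsum_loop, dif_pos (show n ≥ 10 by omega)]
    exact pv_digsum_le (0 + PySem.Int.mod n 10) (PySem.Int.floordiv n 10)
  have hdm := PySem.Int.floordiv_mul_add_mod n 10
  have hm1 := PySem.Int.mod_nonneg n (b := 10) (by omega)
  have hm2 := PySem.Int.mod_lt n (b := 10) (by omega)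
  have hq := PySem.Int.floordiv_eq_ediv_of_pos (a := n) (b := 10) (by omega)
  rw [digit_sum_b]
  omega

-- B's chain-building loop: append the current value, stop once it is a single digit
def build_chain (m : Int) : List Int :=
  if h : m < 10 then [m]
  else m :: build_chain (digit_sum_b m)
termination_by m.toNat
decreasing_by exact pv_dec_digit_sum h

def is_perfect_prime_alt (n : Int) : Bool :=
  (build_chain n).all prime_b

-- ===== PRECONDITION & SPEC =====
def Spec_is_perfect_prime (n : Int) (out : Bool) : Prop := out = is_perfect_prime_alt n
instance (n : Int) (out : Bool) : Decidable (Spec_is_perfect_prime n out) := by unfold Spec_is_perfect_prime; infer_instance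

-- ===== CLAIM (what is proved, stated in full; the proofs are below) =====
def Claim_equal_is_perfect_prime : Prop := ∀ (n : Int), Dom_is_perfect_prime n → Spec_is_perfect_prime n (is_perfect_prime n)

-- ===== LEMMAS AND PROOFS =====

-- a % b == 0 is divisibility (every b)
theorem pv_mod_zero_iff (a b : Int) : PySem.Int.mod a b = 0 ↔ b ∣ a :=
  PySem.Int.mod_eq_zero_iff_dvd a b

-- for odd n and odd d, stepping the trial divisor by 1 or by 2 is the same test
theorem pv_loop_eq {n d : Int} (hodd : ¬ (2 ∣ n)) (hd : 2 ∣ (d + 1)) :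
    es_primer_loop n d = prime_loop_b n d := by
  rw [es_primer_loop, prime_loop_b]
  by_cases h : d * d ≤ n
  · simp only [dif_pos h]
    by_cases hm : PySem.Int.mod n d = 0
    · simp [hm]
    · simp only [hm, if_neg, not_false_iff]
      -- unfold A's loop one more step: d+1 is even, so it never divides odd n
      rw [es_primer_loop]
      by_cases h2 : (d + 1) * (d + 1) ≤ n
      · have hnd : ¬ PySem.Int.mod n (d + 1) = 0 := by
          intro hz
          exact hodd (dvd_trans hd ((pv_mod_zero_iff n (d + 1)).mp hz))
        simp only [dif_pos h2, hnd, if_neg, not_false_iff]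
        have e : d + 1 + 1 = d + 2 := by ring
        rw [e]
        exact pv_loop_eq hodd (by omega)
      · simp only [dif_neg h2]
        rw [prime_loop_b]
        have : ¬ (d + 2) * (d + 2) ≤ n := by nlinarith [pv_le_of_sq_le h]
        simp [this]
  · simp [h]
termination_by (n + 1 - d).toNat
decreasing_by have := pv_le_of_sq_le h; omega

-- A's and B's primality tests agree everywhere
theorem pv_prime_eq (n : Int) : es_primer n = prime_b n := by
  rw [es_primer, prime_b]
  by_cases h1 : n ≤ 1
  · simp [h1, show n < 2 by omega]
  · have h2 : ¬ n < 2 := by omega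
    simp only [h1, h2, if_neg, not_false_iff]
    by_cases he : PySem.Int.mod n 2 = 0
    · have hdvd : (2 : Int) ∣ n := (pv_mod_zero_iff n 2).mp he
      simp only [he, if_pos]
      by_cases hn2 : n = 2
      · subst hn2
        rw [es_primer_loop]; norm_num
      · have h4 : (2 : Int) * 2 ≤ n := by omega
        rw [es_primer_loop, dif_pos h4, if_pos he]
        simp [hn2]
    · simp only [he, if_neg, not_false_iff]
      have hodd : ¬ (2 : Int) ∣ n := fun hd => he ((pv_mod_zero_iff n 2).mpr hd)
      by_cases h4 : (2 : Int) * 2 ≤ n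
      · rw [es_primer_loop, dif_pos h4, if_neg he]
        exact pv_loop_eq hodd (by omega)
      · -- here n is odd with 2 ≤ n < 4, so n = 3: both loops return true
        have hn3 : n = 3 := by omega
        subst hn3
        rw [es_primer_loop, prime_loop_b]
        norm_num

-- B's accumulator loop computes s plus A's recursive digit sum
theorem pv_digsum_eq (s n : Int) : digsum_loop s n = s + suma_dels_digits n := by
  by_cases h : n ≥ 10
  · have h' : ¬ n < 10 := by omega
    rw [digsum_loop, dif_pos h, suma_dels_digits, dif_neg h',
        pv_digsum_eq (s + PySem.Int.mod n 10) (PySem.Int.floordiv n 10)]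
    ring
  · rw [digsum_loop, dif_neg h, suma_dels_digits, dif_pos (show n < 10 by omega)]
termination_by n.toNat
decreasing_by exact pv_dec_div (by omega)

theorem pv_digit_sum_eq (n : Int) : digit_sum_b n = suma_dels_digits n := by
  rw [digit_sum_b, pv_digsum_eq, zero_add]

-- main equivalence: A's level-by-level recursion equals "all elements of the chain are prime"
theorem pv_eq (n : Int) : is_perfect_prime n = (build_chain n).all prime_b := by
  rw [is_perfect_prime, build_chain]
  by_cases hp : es_primer n = true
  · simp only [hp, dif_pos]
    by_cases h10 : n < 10
    · simp [h10, List.all, ← pv_prime_eq, hp]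
    · simp only [h10, decide_false, Bool.false_and, if_neg, Bool.false_eq_true,
        not_false_iff, dif_neg]
      rw [List.all_cons, ← pv_prime_eq, hp, Bool.true_and, pv_digit_sum_eq]
      by_cases hps : es_primer (suma_dels_digits n) = true
      · simp only [hps, if_pos]
        exact pv_eq (suma_dels_digits n)
      · simp only [hps, if_neg, Bool.false_eq_true, not_false_iff]
        rw [← pv_eq (suma_dels_digits n), is_perfect_prime]
        simp [hps]
  · simp only [hp, dif_neg, not_false_iff, Bool.false_eq_true]
    split
    · simp [List.all, ← pv_prime_eq, hp]
    · rw [List.all_cons, ← pv_prime_eq]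
      simp [hp]
termination_by n.toNat
decreasing_by
  all_goals exact pv_dec_suma h10

-- ===== VERDICT (by name: the statement is the Claim_ definition above) =====
theorem is_perfect_prime_spec : Claim_equal_is_perfect_prime := by
  intro n _
  exact pv_eq n
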